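-- pv_equiv track=rewrite | github.com/paulschreibergit/DRLJSSPBA25 | utils/conflict_utils.py | compute_max_possible_conflicts
-- ===== SOURCE A (Python) =====
-- from collections import defaultdict
--
-- def compute_max_possible_conflicts(jobs_data):
--
--     machine_to_ops = defaultdict(list)
--
--     for job_id, job in enumerate(jobs_data):
--         for op_id, (machine, _) in enumerate(job):
--             machine_to_ops[machine].append((job_id, op_id))
--
--     max_conflicts = 0
--     for machine, ops in machine_to_ops.items():
--         n = len(ops)
--         if n >= 2:
--             max_conflicts += n * (n - 1) // 2  # K_n über 2
--
--     return max_conflicts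
-- ===== SOURCE B (Python) =====
-- def compute_max_possible_conflicts(jobs_data):
--     seen = {}
--     total = 0
--     for job in jobs_data:
--         for machine, _ in job:
--             c = seen.get(machine, 0)
--             total += c
--             seen[machine] = c + 1
--     return total
-- ===== Notes on version B (the rewrite author's own statement) =====
-- stated objective: simpler
-- what changed: Replaces the two-phase grouping (build machine->operations lists, then sum n*(n-1)//2 per group) by a single incremental pass that keeps only a per-machine counter and adds the count seen so far for each operation's machine, accumulating C(n,2) as 0+1+...+(n-1).
import Mathlib
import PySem

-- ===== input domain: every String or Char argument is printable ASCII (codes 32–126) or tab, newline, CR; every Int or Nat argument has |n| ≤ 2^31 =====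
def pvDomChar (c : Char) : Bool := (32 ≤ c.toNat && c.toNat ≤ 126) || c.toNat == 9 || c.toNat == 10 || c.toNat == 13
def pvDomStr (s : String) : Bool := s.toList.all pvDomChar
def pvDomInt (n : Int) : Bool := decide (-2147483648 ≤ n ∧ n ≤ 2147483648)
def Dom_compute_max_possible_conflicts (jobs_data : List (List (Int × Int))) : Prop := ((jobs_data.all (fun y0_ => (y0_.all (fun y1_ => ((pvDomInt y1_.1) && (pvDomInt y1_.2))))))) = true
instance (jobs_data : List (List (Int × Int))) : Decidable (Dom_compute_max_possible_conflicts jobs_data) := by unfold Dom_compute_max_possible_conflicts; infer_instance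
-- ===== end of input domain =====

-- One honest line: B replaces A's two-phase grouping (per-machine operation lists, then
-- n*(n-1)//2 per group) by a single incremental pass with a per-machine counter; simpler.


-- ===== PORT A =====
def compute_max_possible_conflicts (jobs_data : List (List (Int × Int))) : Int :=
  let machine_to_ops : PySem.Dict Int (List (Int × Int)) :=
    (PySem.List.enumerate jobs_data).foldl
      (fun d ji =>
        (PySem.List.enumerate ji.2).foldl
          (fun d oi => d.modify oi.2.1 [] (fun x => x ++ [(ji.1, oi.1)])) d)
      (PySem.Dict.mk [])
  machine_to_ops.items.foldl
    (fun acc p =>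
      let n : Int := p.2.length
      if n ≥ 2 then acc + PySem.Int.floordiv (n * (n - 1)) 2 else acc)
    0

-- ===== PORT B =====
def compute_max_possible_conflicts_alt (jobs_data : List (List (Int × Int))) : Int :=
  (jobs_data.foldl
    (fun st job => job.foldl
      (fun st op =>
        let c := st.1.getD op.1 0
        (st.1.insert op.1 (c + 1), st.2 + c)) st)
    ((PySem.Dict.mk [] : PySem.Dict Int Int), (0 : Int))).2

-- ===== PRECONDITION & SPEC =====
def Spec_compute_max_possible_conflicts (jobs_data : List (List (Int × Int))) (out : Int) : Prop := out = compute_max_possible_conflicts_alt jobs_data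
instance (jobs_data : List (List (Int × Int))) (out : Int) : Decidable (Spec_compute_max_possible_conflicts jobs_data out) := by unfold Spec_compute_max_possible_conflicts; infer_instance

-- ===== CLAIM (what is proved, stated in full; the proofs are below) =====
def Claim_equal_compute_max_possible_conflicts : Prop := ∀ (jobs_data : List (List (Int × Int))), Dom_compute_max_possible_conflicts jobs_data → Spec_compute_max_possible_conflicts jobs_data (compute_max_possible_conflicts jobs_data)

-- ===== LEMMAS AND PROOFS =====

/-- The flattened machine sequence of the jobs data. -/
def pvMachines (jd : List (List (Int × Int))) : List Int :=
  jd.flatMap (fun job => job.map (·.1))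

/-- (machine, (job_id, op_id)) pairs, flattened, with outer enumeration starting at s. -/
def pvPairs : List (List (Int × Int)) → Int → List (Int × (Int × Int))
  | [], _ => []
  | j :: r, s =>
      (PySem.List.enumerate j 0).map (fun oi => (oi.2.1, (s, oi.1))) ++ pvPairs r (s + 1)

def pvC2 (n : Int) : Int := PySem.Int.floordiv (n * (n - 1)) 2

def pvBStep (st : PySem.Dict Int Int × Int) (m : Int) : PySem.Dict Int Int × Int :=
  (st.1.insert m (st.1.getD m 0 + 1), st.2 + st.1.getD m 0)

lemma pvC2_zero_of_lt (n : Int) (h : 0 ≤ n) (h2 : n < 2) : pvC2 n = 0 := by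
  interval_cases n <;> decide

lemma pvC2_succ (k : Int) : pvC2 (k + 1) = pvC2 k + k := by
  unfold pvC2 PySem.Int.floordiv
  have : (k + 1) * (k + 1 - 1) = k * (k - 1) + k * 2 := by ring
  rw [this, Int.add_mul_fdiv_right _ _ (by norm_num)]

-- A's nested dict-building loop is the flat fold over pvPairs.
lemma pvA_nest (jd : List (List (Int × Int))) : ∀ (s : Int) (d : PySem.Dict Int (List (Int × Int))),
    (PySem.List.enumerate jd s).foldl
      (fun d ji =>
        (PySem.List.enumerate ji.2).foldl
          (fun d oi => d.modify oi.2.1 [] (fun x => x ++ [(ji.1, oi.1)])) d) d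
    = (pvPairs jd s).foldl (fun d p => d.modify p.1 [] (fun x => x ++ [p.2])) d := by
  induction jd with
  | nil => intro s d; simp [pvPairs, PySem.List.enumerate]
  | cons j r ih =>
    intro s d
    rw [PySem.List.enumerate_cons, List.foldl_cons, pvPairs, List.foldl_append, ih]
    congr 1
    rw [List.foldl_map]

lemma pvPairs_map_fst (jd : List (List (Int × Int))) : ∀ s : Int,
    (pvPairs jd s).map (·.1) = pvMachines jd := by
  induction jd with
  | nil => intro s; simp [pvPairs, pvMachines]
  | cons j r ih =>
    intro s
    simp only [pvPairs, pvMachines, List.map_append, List.flatMap_cons]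
    congr 1
    · have h2 := PySem.List.map_snd_enumerate j 0
      conv_rhs => rw [← h2]
      simp only [List.map_map]
      rfl
    · exact ih (s + 1)

-- A sum over a fold with an `if` accumulator is the sum of the mapped terms.
lemma pvFoldl_if_sum (l : List (Int × List (Int × Int))) : ∀ a : Int,
    l.foldl (fun acc p =>
      let n : Int := p.2.length
      if n ≥ 2 then acc + PySem.Int.floordiv (n * (n - 1)) 2 else acc) a
    = a + (l.map (fun p =>
        if (p.2.length : Int) ≥ 2 then PySem.Int.floordiv ((p.2.length : Int) * ((p.2.length : Int) - 1)) 2 else 0)).sum := by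
  induction l with
  | nil => intro a; simp
  | cons x r ih =>
    intro a
    simp only [List.foldl_cons, List.map_cons, List.sum_cons]
    rw [ih]
    split_ifs <;> ring

-- Sum over a dict's items = sum over its (nodup) keys of the looked-up values.
lemma pvItems_sum (l : List (Int × List (Int × Int))) (g : Int → List (Int × Int) → Int)
    (hnd : (l.map (·.1)).Nodup) :
    (l.map (fun p => g p.1 p.2)).sum
    = ((l.map (·.1)).map (fun k => g k ((PySem.Dict.mk l).getD k []))).sum := by
  induction l with
  | nil => simp
  | cons x r ih =>
    obtain ⟨k, v⟩ := x
    simp only [List.map_cons, List.sum_cons]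
    simp only [List.map_cons, List.nodup_cons] at hnd
    have hk : (PySem.Dict.mk ((k, v) :: r)).getD k [] = v := by
      simp [PySem.Dict.getD, PySem.Dict.get?_mk_cons]
    rw [hk]
    congr 1
    rw [ih hnd.2]
    refine congrArg List.sum (List.map_congr_left ?_)
    intro k' hk'
    have hne : k ≠ k' := fun h => hnd.1 (h ▸ hk')
    simp [PySem.Dict.getD, PySem.Dict.get?_mk_cons, hne]

-- A equals the sum of C2(count) over the distinct machines.
lemma pvA_eq (jd : List (List (Int × Int))) :
    compute_max_possible_conflicts jd
    = ((PySem.Set.ofList (pvMachines jd)).map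
        (fun k => pvC2 (((pvMachines jd).count k : Int)))).sum := by
  unfold compute_max_possible_conflicts
  rw [pvA_nest jd 0 (PySem.Dict.mk [])]
  set D := (pvPairs jd 0).foldl (fun d p => d.modify p.1 [] (fun x => x ++ [p.2]))
      (PySem.Dict.mk []) with hD
  have hkeys : D.keys = PySem.Set.ofList (pvMachines jd) := by
    rw [hD]
    have := PySem.Dict.keys_foldl_modify_key (pvPairs jd 0) (·.1) []
      (fun _ p => (fun x => x ++ [p.2])) (PySem.Dict.mk [])
    rw [this, pvPairs_map_fst jd 0]
    have : (PySem.Dict.mk ([] : List (Int × List (Int × Int)))).keys = [] := by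
      simp [PySem.Dict.keys]
    rw [this, PySem.Set.update_nil_left]
  have hget : ∀ m, (D.getD m []).length = (pvMachines jd).count m := by
    intro m
    rw [hD, PySem.Dict.getD_foldl_modify_append]
    have h0 : (PySem.Dict.mk ([] : List (Int × List (Int × Int)))).getD m [] = [] := by
      simp [PySem.Dict.getD, PySem.Dict.get?]
    rw [h0, List.nil_append, List.length_map]
    rw [← pvPairs_map_fst jd 0, List.count_eq_countP, List.countP_map,
      List.countP_eq_length_filter]
    rfl
  have hnd : D.keys.Nodup := by
    rw [hkeys]; exact PySem.Set.nodup_ofList _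
  rw [pvFoldl_if_sum, zero_add]
  have hkeysdef : D.keys = D.items.map (·.1) := rfl
  have := pvItems_sum D.items
      (fun _ v => if (v.length : Int) ≥ 2 then PySem.Int.floordiv ((v.length : Int) * ((v.length : Int) - 1)) 2 else 0)
      (by rw [← hkeysdef]; exact hnd)
  have hDmk : PySem.Dict.mk D.items = D := rfl
  rw [hDmk] at this
  rw [this, ← hkeysdef, hkeys]
  refine congrArg List.sum (List.map_congr_left ?_)
  intro k _
  simp only
  rw [hget k]
  by_cases h : ((pvMachines jd).count k : Int) ≥ 2
  · simp only [h, if_true]; rfl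
  · simp only [h, if_false]
    exact (pvC2_zero_of_lt _ (by positivity) (by omega)).symm

-- B's nested loop is the flat fold of pvBStep over the machines.
lemma pvB_nest (jd : List (List (Int × Int))) : ∀ st : PySem.Dict Int Int × Int,
    jd.foldl
      (fun st job => job.foldl
        (fun st op =>
          let c := st.1.getD op.1 0
          (st.1.insert op.1 (c + 1), st.2 + c)) st) st
    = (pvMachines jd).foldl pvBStep st := by
  induction jd with
  | nil => intro st; simp [pvMachines]
  | cons j r ih =>
    intro st
    simp only [List.foldl_cons, pvMachines, List.flatMap_cons, List.foldl_append]
    rw [ih]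
    congr 1
    rw [List.foldl_map]
    rfl

-- The dict component of B's fold is the plain counting fold.
lemma pvB_fst (l : List Int) : ∀ (d : PySem.Dict Int Int) (t : Int),
    (l.foldl pvBStep (d, t)).1 = l.foldl (fun d m => d.insert m (d.getD m 0 + 1)) d := by
  induction l with
  | nil => intro d t; rfl
  | cons m r ih => intro d t; simp only [List.foldl_cons, pvBStep]; exact ih _ _

-- The key identity: grouped C2-sum = incremental pair count.
lemma pvMain (l : List Int) :
    ((PySem.Set.ofList l).map (fun k => pvC2 ((l.count k : Int)))).sum
    = (l.foldl pvBStep (PySem.Dict.mk [], 0)).2 := by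
  induction l using List.reverseRecOn with
  | nil => rfl
  | append_singleton l m ih =>
    rw [List.foldl_append, List.foldl_cons, List.foldl_nil]
    have hfst := pvB_fst l (PySem.Dict.mk []) 0
    have hcnt : ((l.foldl pvBStep (PySem.Dict.mk [], 0)).1).getD m 0 = (l.count m : Int) := by
      rw [hfst, PySem.Dict.getD_foldl_insert_add_one]
      have : (PySem.Dict.mk ([] : List (Int × Int))).getD m 0 = 0 := by
        simp [PySem.Dict.getD, PySem.Dict.get?]
      rw [this, zero_add]
    simp only [pvBStep]
    rw [hcnt, ← ih]
    rw [PySem.Set.ofList_append_singleton]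
    by_cases hm : m ∈ PySem.Set.ofList l
    · rw [PySem.Set.add_of_mem hm]
      have key : ∀ s : List Int, m ∈ s → s.Nodup →
          (s.map (fun k => pvC2 (((l ++ [m]).count k : Int)))).sum
          = (s.map (fun k => pvC2 ((l.count k : Int)))).sum + (l.count m : Int) := by
        intro s
        induction s with
        | nil => intro hms _; simp at hms
        | cons k r ihr =>
          intro hms hnds
          simp only [List.map_cons, List.sum_cons]
          rcases List.mem_cons.mp hms with h | h
          · subst h
            have hknr : m ∉ r := (List.nodup_cons.mp hnds).1
            have hre : r.map (fun k' => pvC2 (((l ++ [m]).count k' : Int)))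
                = r.map (fun k' => pvC2 ((l.count k' : Int))) := by
              refine List.map_congr_left fun k' hk' => ?_
              have hne : m ≠ k' := fun h => hknr (h ▸ hk')
              rw [List.count_append]
              simp [hne]
            rw [hre]
            have hc : ((l ++ [m]).count m : Int) = (l.count m : Int) + 1 := by
              rw [List.count_append]
              simp
            rw [hc, pvC2_succ]
            ring
          · have hkm : k ≠ m := fun he => (List.nodup_cons.mp hnds).1 (he ▸ h)
            have hc : ((l ++ [m]).count k : Int) = (l.count k : Int) := by
              rw [List.count_append]
              simp [Ne.symm hkm]
            rw [hc, ihr h (List.nodup_cons.mp hnds).2]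
            ring
      exact key _ hm (PySem.Set.nodup_ofList l)
    · rw [PySem.Set.add_of_not_mem hm]
      have hnotmem : m ∉ l := fun h => hm ((PySem.Set.mem_ofList l m).mpr h)
      have hc0 : l.count m = 0 := List.count_eq_zero.mpr hnotmem
      rw [List.map_append, List.sum_append]
      have hre : (PySem.Set.ofList l).map (fun k => pvC2 (((l ++ [m]).count k : Int)))
          = (PySem.Set.ofList l).map (fun k => pvC2 ((l.count k : Int))) := by
        refine List.map_congr_left fun k hk => ?_
        have hne : k ≠ m := fun h => hm (h ▸ hk)
        rw [List.count_append]
        simp [Ne.symm hne]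
      rw [hre]
      have hone : (([m] : List Int).map (fun k => pvC2 (((l ++ [m]).count k : Int)))).sum = 0 := by
        simp only [List.map_cons, List.map_nil, List.sum_cons, List.sum_nil]
        rw [List.count_append]
        simp [hc0, pvC2_zero_of_lt]
      rw [hone, hc0]
      simp

-- ===== VERDICT (by name: the statement is the Claim_ definition above) =====
theorem compute_max_possible_conflicts_spec : Claim_equal_compute_max_possible_conflicts := by
  intro jd _
  unfold Spec_compute_max_possible_conflicts compute_max_possible_conflicts_alt
  rw [pvB_nest, ← pvMain, ← pvA_eq]
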